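-- pv_equiv track=rewrite | github.com/socraticblock/ai-engineering-from-scratch | practice/05_context_engineering.py | reorder_lost_in_middle
-- ===== SOURCE A (Python) =====
-- def reorder_lost_in_middle(items, scores):
--     """Put most relevant first and last, least relevant in middle."""
--     paired = sorted(zip(scores, items), key=lambda x: x[0], reverse=True)
--     sorted_items = [item for _, item in paired]
--     if len(sorted_items) <= 2:
--         return sorted_items
--     first_half = sorted_items[::2]
--     second_half = list(reversed(sorted_items[1::2]))
--     return first_half + second_half
-- ===== SOURCE B (Python) =====
-- def reorder_lost_in_middle(items, scores):
--     """Put most relevant first and last, least relevant in middle."""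
--     s = [item for _, item in sorted(zip(scores, items), key=lambda x: x[0], reverse=True)]
--     n = len(s)
--     return [s[2 * p] if 2 * p < n else s[2 * (n - 1 - p) + 1] for p in range(n)]
-- ===== Notes on version B (the rewrite author's own statement) =====
-- stated objective: alternative
-- what changed: After the same stable reverse sort, B fills each output position by a closed-form index formula in one comprehension (a gather: out[p] = s[2p] if 2p < n else s[2(n-1-p)+1]) instead of concatenating the even-index slice with the reversed odd-index slice, and needs no n<=2 early return.
import Mathlib
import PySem

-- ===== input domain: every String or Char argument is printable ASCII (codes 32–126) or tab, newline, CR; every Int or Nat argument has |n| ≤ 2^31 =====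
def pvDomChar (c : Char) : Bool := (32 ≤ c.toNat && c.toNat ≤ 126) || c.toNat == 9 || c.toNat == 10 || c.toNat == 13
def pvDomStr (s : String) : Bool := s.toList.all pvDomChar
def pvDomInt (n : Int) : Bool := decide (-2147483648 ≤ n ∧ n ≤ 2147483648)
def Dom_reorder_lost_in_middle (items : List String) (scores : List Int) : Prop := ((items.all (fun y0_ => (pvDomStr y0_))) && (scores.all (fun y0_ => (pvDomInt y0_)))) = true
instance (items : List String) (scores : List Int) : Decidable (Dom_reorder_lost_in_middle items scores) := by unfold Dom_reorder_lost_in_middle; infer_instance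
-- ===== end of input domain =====

-- B replaces A's even/odd slicing, reversal and concatenation by a single gather comprehension
-- computing each output position's source rank in closed form (objective: alternative decomposition).

-- ===== PORT A =====
def reorder_lost_in_middle (items : List String) (scores : List Int) : List String :=
  let paired := PySem.List.sorted (scores.zip items) (fun x => x.1) true
  let sorted_items := paired.map (fun p => p.2)
  if sorted_items.length ≤ 2 then sorted_items
  else
    let first_half := (PySem.List.slice? sorted_items none none 2).getD []
    let second_half := ((PySem.List.slice? sorted_items (some 1) none 2).getD []).reverse
    first_half ++ second_half

-- ===== PORT B =====
def reorder_lost_in_middle_alt (items : List String) (scores : List Int) : List String :=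
  let s := (PySem.List.sorted (scores.zip items) (fun x => x.1) true).map (fun p => p.2)
  let n : Int := s.length
  (PySem.List.pyRange 0 n 1).map (fun p =>
    if 2 * p < n then PySem.List.pyGetD s (2 * p) ""
    else PySem.List.pyGetD s (2 * (n - 1 - p) + 1) "")

-- ===== PRECONDITION & SPEC =====
def Spec_reorder_lost_in_middle (items : List String) (scores : List Int) (out : List String) : Prop := out = reorder_lost_in_middle_alt items scores
instance (items : List String) (scores : List Int) (out : List String) : Decidable (Spec_reorder_lost_in_middle items scores out) := by unfold Spec_reorder_lost_in_middle; infer_instance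

-- ===== CLAIM (what is proved, stated in full; the proofs are below) =====
def Claim_equal_reorder_lost_in_middle : Prop := ∀ (items : List String) (scores : List Int), Dom_reorder_lost_in_middle items scores → Spec_reorder_lost_in_middle items scores (reorder_lost_in_middle items scores)

-- ===== LEMMAS AND PROOFS =====

lemma pvFilterMapSome {β : Type} (l : List Nat) (f : Nat → Option β) (g : Nat → β)
    (h : ∀ a ∈ l, f a = some (g a)) : l.filterMap f = l.map g := by
  induction l with
  | nil => rfl
  | cons x xs ih =>
      simp only [List.filterMap_cons, h x (by simp), List.map_cons]
      rw [ih (fun a ha => h a (by simp [ha]))]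

lemma pvEvens (s : List String) :
    (PySem.List.slice? s none none 2).getD []
      = (List.range ((s.length + 1) / 2)).map (fun k => s.getD (2 * k) "") := by
  simp only [PySem.List.slice?, PySem.List.sliceIndices]
  norm_num
  have hc : (if 0 < s.length then (((s.length:Int) + 2 - 1)/2).toNat else 0) = (s.length+1)/2 := by
    split <;> omega
  rw [hc]
  apply pvFilterMapSome
  intro k hk
  simp only [List.mem_range] at hk
  have h2 : 2 * k < s.length := by omega
  have h3 : ((2:Int) * (k:Int)).toNat = 2 * k := by omega
  rw [h3]
  simp [List.getElem?_eq_getElem h2]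

lemma pvOdds (s : List String) :
    (PySem.List.slice? s (some 1) none 2).getD []
      = (List.range (s.length / 2)).map (fun k => s.getD (2 * k + 1) "") := by
  simp only [PySem.List.slice?, PySem.List.sliceIndices]
  norm_num
  by_cases h0 : s.length = 0
  · have hs : s = [] := List.eq_nil_of_length_eq_zero h0
    subst hs; simp
  · have hmin : min (1:Int) (s.length : Int) = 1 := by omega
    rw [hmin]
    have hc : (if 1 < s.length then (((s.length:Int) - 1 + 2 - 1)/2).toNat else 0)
        = s.length / 2 := by split <;> omega
    rw [hc]
    apply pvFilterMapSome
    intro k hk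
    simp only [List.mem_range] at hk
    have h2 : 2 * k + 1 < s.length := by omega
    have h3 : ((1:Int) + 2 * (k:Int)).toNat = 2 * k + 1 := by omega
    rw [h3]
    simp [List.getElem?_eq_getElem h2]

lemma pvConcat (s : List String) :
    (List.range ((s.length + 1) / 2)).map (fun k => s.getD (2 * k) "")
      ++ ((List.range (s.length / 2)).map (fun k => s.getD (2 * k + 1) "")).reverse
    = (List.range s.length).map
        (fun p => if 2 * p < s.length then s.getD (2 * p) ""
                  else s.getD (2 * (s.length - 1 - p) + 1) "") := by
  apply List.ext_getElem
  · simp; omega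
  · intro i h1 h2
    simp only [List.length_append, List.length_map, List.length_reverse, List.length_range] at h1
    simp only [List.getElem_map, List.getElem_range]
    by_cases hi : i < (s.length + 1) / 2
    · rw [List.getElem_append_left (by simpa using hi)]
      simp only [List.getElem_map, List.getElem_range]
      rw [if_pos (by omega)]
    · rw [List.getElem_append_right (by simpa using hi)]
      simp only [List.length_map, List.length_range, List.getElem_reverse, List.getElem_map,
        List.getElem_range]
      rw [if_neg (by omega)]
      congr 1
      omega

lemma pvBmap (s : List String) :
    (PySem.List.pyRange 0 (s.length : Int) 1).map
        (fun p => if 2 * p < (s.length : Int) then PySem.List.pyGetD s (2 * p) ""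
                  else PySem.List.pyGetD s (2 * ((s.length : Int) - 1 - p) + 1) "")
    = (List.range s.length).map
        (fun p => if 2 * p < s.length then s.getD (2 * p) ""
                  else s.getD (2 * (s.length - 1 - p) + 1) "") := by
  rw [PySem.List.pyRange_one]
  simp only [Int.sub_zero, Int.toNat_natCast, List.map_map]
  apply List.map_congr_left
  intro p hp
  simp only [List.mem_range] at hp
  simp only [Function.comp_apply, Int.zero_add]
  by_cases h2 : 2 * p < s.length
  · rw [if_pos (by exact_mod_cast h2), if_pos h2]
    have : (2:Int) * (p:Int) = ((2*p : Nat) : Int) := by push_cast; ring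
    rw [this, PySem.List.pyGetD_natCast]
  · rw [if_neg (by exact_mod_cast h2), if_neg h2]
    have hcast : 2 * ((s.length:Int) - 1 - (p:Int)) + 1 = ((2 * (s.length - 1 - p) + 1 : Nat) : Int) := by omega
    rw [hcast, PySem.List.pyGetD_natCast]

lemma pvSmall (s : List String) (h : s.length ≤ 2) :
    s = (List.range s.length).map
        (fun p => if 2 * p < s.length then s.getD (2 * p) ""
                  else s.getD (2 * (s.length - 1 - p) + 1) "") := by
  match s with
  | [] => rfl
  | [a] => simp
  | [a, b] => norm_num [List.range_succ]
  | a :: b :: c :: t => simp at h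

lemma pvKey (s : List String) :
    (if s.length ≤ 2 then s
     else (PySem.List.slice? s none none 2).getD []
          ++ ((PySem.List.slice? s (some 1) none 2).getD []).reverse)
    = (PySem.List.pyRange 0 (s.length : Int) 1).map
        (fun p => if 2 * p < (s.length : Int) then PySem.List.pyGetD s (2 * p) ""
                  else PySem.List.pyGetD s (2 * ((s.length : Int) - 1 - p) + 1) "") := by
  rw [pvBmap]
  by_cases h : s.length ≤ 2
  · rw [if_pos h]; exact pvSmall s h
  · rw [if_neg h, pvEvens, pvOdds, pvConcat]

-- ===== VERDICT (by name: the statement is the Claim_ definition above) =====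
theorem reorder_lost_in_middle_spec : Claim_equal_reorder_lost_in_middle := by
  intro items scores _
  unfold Spec_reorder_lost_in_middle reorder_lost_in_middle reorder_lost_in_middle_alt
  exact pvKey _
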